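-- pv_equiv track=rewrite | github.com/krizzo101/master_root | libs/opsvi-agents/opsvi_agents/core_agents/coder.py | _apply_solid_principles
-- ===== SOURCE A (Python) =====
-- from typing import Any, Dict, List, Optional, Tuple, Union, Set
--
-- def _apply_solid_principles(code: str) -> Tuple[str, List[str]]:
--     """Apply SOLID principles."""
--     changes = []
--     # Suggest SOLID principle improvements
--     if "class " in code:
--         lines = code.splitlines()
--         class_lines = [i for i, line in enumerate(lines) if "class " in line]
--         for i in class_lines:
--             # Check for Single Responsibility
--             methods_count = sum(1 for line in lines[i:i+50] if "def " in line)
--             if methods_count > 7: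
--                 changes.append("Consider splitting class - Single Responsibility Principle")
--     return code, changes
-- ===== SOURCE B (Python) =====
-- from typing import Tuple, List
--
-- def _apply_solid_principles(code: str) -> Tuple[str, List[str]]:
--     """Apply SOLID principles (prefix-sum re-implementation)."""
--     changes = []
--     if "class " in code:
--         lines = code.splitlines()
--         n = len(lines)
--         # prefix sums: pref[j] = number of the first j lines containing "def "
--         pref = [0]
--         for line in lines:
--             pref.append(pref[-1] + (1 if "def " in line else 0))
--         for i in range(n):
--             if "class " in lines[i]:
--                 if pref[min(i + 50, n)] - pref[i] > 7:
--                     changes.append("Consider splitting class - Single Responsibility Principle")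
--     return code, changes
-- ===== Notes on version B (the rewrite author's own statement) =====
-- stated objective: alternative
-- what changed: Replaces A's per-class rescan of each 50-line window with one prefix-sum table of method-definition line counts built in a single pass, then answers each class line by subtracting two table entries.
import Mathlib
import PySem

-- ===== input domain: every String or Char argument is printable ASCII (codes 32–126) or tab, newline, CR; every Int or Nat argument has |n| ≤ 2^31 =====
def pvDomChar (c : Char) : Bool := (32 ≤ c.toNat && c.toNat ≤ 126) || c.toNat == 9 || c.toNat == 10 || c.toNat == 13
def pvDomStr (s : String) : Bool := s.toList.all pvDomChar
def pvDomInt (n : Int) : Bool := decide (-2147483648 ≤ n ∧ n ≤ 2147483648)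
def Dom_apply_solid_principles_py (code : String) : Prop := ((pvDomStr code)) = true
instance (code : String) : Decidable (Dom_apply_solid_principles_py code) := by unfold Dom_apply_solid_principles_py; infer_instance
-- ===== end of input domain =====

-- B replaces A's per-class 50-line rescans with one prefix-sum table over the lines (alternative decomposition; same return value).

-- ===== PORT A =====
def apply_solid_principles_py (code : String) : String × List String :=
  let changes : List String := []
  if PySem.Str.isIn "class " code then
    let lines := PySem.Str.splitlines code
    let class_lines : List Int := (PySem.List.enumerate lines 0).foldl
      (fun acc pr => if PySem.Str.isIn "class " pr.2 then acc ++ [pr.1] else acc) []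
    let changes := class_lines.foldl (fun acc i =>
      let methods_count : Int := (PySem.List.slice lines (some i) (some (i + 50))).foldl
        (fun c line => if PySem.Str.isIn "def " line then c + 1 else c) 0
      if methods_count > 7 then
        acc ++ ["Consider splitting class - Single Responsibility Principle"]
      else acc) changes
    (code, changes)
  else (code, changes)

-- ===== PORT B =====
def apply_solid_principles_py_alt (code : String) : String × List String :=
  let changes : List String := []
  if PySem.Str.isIn "class " code then
    let lines := PySem.Str.splitlines code
    let n : Int := lines.length
    -- pref[j] = number of the first j lines containing "def "
    let pref : List Int := lines.foldl
      (fun acc line => acc ++ [PySem.List.pyGetD acc (-1) 0 +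
        (if PySem.Str.isIn "def " line then 1 else 0)]) [0]
    let changes := (PySem.List.pyRange 0 n 1).foldl (fun acc i =>
      if PySem.Str.isIn "class " (PySem.List.pyGetD lines i "") then
        if PySem.List.pyGetD pref (min (i + 50) n) 0 - PySem.List.pyGetD pref i 0 > 7 then
          acc ++ ["Consider splitting class - Single Responsibility Principle"]
        else acc
      else acc) changes
    (code, changes)
  else (code, changes)

-- ===== PRECONDITION & SPEC =====
def Spec_apply_solid_principles_py (code : String) (out : String × List String) : Prop := out = apply_solid_principles_py_alt code
instance (code : String) (out : String × List String) : Decidable (Spec_apply_solid_principles_py code out) := by unfold Spec_apply_solid_principles_py; infer_instance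

-- ===== CLAIM (what is proved, stated in full; the proofs are below) =====
def Claim_equal_apply_solid_principles_py : Prop := ∀ (code : String), Dom_apply_solid_principles_py code → Spec_apply_solid_principles_py code (apply_solid_principles_py code)

-- ===== LEMMAS AND PROOFS =====

-- the per-line "def " test, shared by both characterisations
def pvQ (line : String) : Bool := PySem.Str.isIn "def " line

-- B's prefix list is the table of "def "-counts of the prefixes of `lines`
theorem pref_gen (xs : List String) : ∀ (pre : List String),
    xs.foldl (fun acc line => acc ++ [PySem.List.pyGetD acc (-1) 0 +
        (if pvQ line then 1 else 0)])
      ((List.range (pre.length + 1)).map (fun j => ((pre.take j).countP pvQ : Int)))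
    = (List.range (pre.length + xs.length + 1)).map
        (fun j => (((pre ++ xs).take j).countP pvQ : Int)) := by
  induction xs with
  | nil => intro pre; simp
  | cons x xs ih =>
    intro pre
    rw [List.foldl_cons]
    have hacc : ((List.range (pre.length + 1)).map (fun j => ((pre.take j).countP pvQ : Int)))
        ++ [PySem.List.pyGetD ((List.range (pre.length + 1)).map
              (fun j => ((pre.take j).countP pvQ : Int))) (-1) 0 + (if pvQ x then 1 else 0)]
        = (List.range ((pre ++ [x]).length + 1)).map
            (fun j => (((pre ++ [x]).take j).countP pvQ : Int)) := by
      have hlen : (pre ++ [x]).length = pre.length + 1 := by simp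
      rw [hlen, List.range_succ (n := pre.length + 1)]
      have hlast : PySem.List.pyGetD ((List.range (pre.length + 1)).map
            (fun j => ((pre.take j).countP pvQ : Int))) (-1) 0
          = ((pre.take pre.length).countP pvQ : Int) := by
        rw [List.range_succ, List.map_append]
        exact PySem.List.pyGetD_neg_one_append_singleton
          ((List.range pre.length).map (fun j => ((pre.take j).countP pvQ : Int)))
          ((pre.take pre.length).countP pvQ : Int) 0
      rw [hlast, List.map_append]
      congr 1
      · apply List.map_congr_left
        intro j hj
        simp only [List.mem_range] at hj
        rw [List.take_append_of_le_length (by omega)]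
      · have ht : (pre ++ [x]).take (pre.length + 1) = pre ++ [x] :=
          List.take_of_length_le (by simp)
        simp only [List.map_cons, List.map_nil, ht, List.countP_append, List.take_length]
        congr 1
        rcases Bool.eq_false_or_eq_true (pvQ x) with h | h <;>
          simp [h]
    rw [hacc, ih (pre ++ [x])]
    simp [List.append_assoc]
    congr 2
    omega
theorem pref_spec (lines : List String) :
    lines.foldl (fun acc line => acc ++ [PySem.List.pyGetD acc (-1) 0 +
        (if PySem.Str.isIn "def " line then 1 else 0)]) [0]
    = (List.range (lines.length + 1)).map (fun j => ((lines.take j).countP pvQ : Int)) := by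
  have h := pref_gen lines []
  simp only [pvQ] at h
  simpa using h

-- take clamps at the length
theorem take_min_len {α : Type} (xs : List α) (a : Nat) :
    xs.take (min a xs.length) = xs.take a := by
  by_cases h : a ≤ xs.length
  · rw [Nat.min_eq_left h]
  · rw [Nat.min_eq_right (by omega), List.take_length,
        List.take_of_length_le (by omega)]

-- the prefix-sum difference at i equals A's count over lines[i:i+50]
theorem cnt_eq (lines : List String) (i : Int) (h0 : 0 ≤ i) (h1 : i < lines.length) :
    PySem.List.pyGetD ((List.range (lines.length + 1)).map
        (fun j => ((lines.take j).countP pvQ : Int))) (min (i + 50) (lines.length : Int)) 0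
      - PySem.List.pyGetD ((List.range (lines.length + 1)).map
        (fun j => ((lines.take j).countP pvQ : Int))) i 0
    = (PySem.List.slice lines (some i) (some (i + 50))).foldl
        (fun c line => if PySem.Str.isIn "def " line then c + 1 else c) 0 := by
  rw [PySem.List.slice_toNat lines h0 (by omega)]
  simp only [show ∀ (line : String), PySem.Str.isIn "def " line = pvQ line from fun _ => rfl]
  rw [PySem.List.foldl_if_add_one pvQ]
  rw [PySem.List.pyGetD_of_nonneg _ _ (by omega), PySem.List.pyGetD_of_nonneg _ _ h0]
  have hmin : (min (i + 50) (lines.length : Int)).toNat = min (i.toNat + 50) lines.length := by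
    omega
  rw [hmin, PySem.List.getD_map_range _ _ _ _ (by omega),
      PySem.List.getD_map_range _ _ _ _ (by omega)]
  rw [take_min_len, List.take_add, List.countP_append]
  have : (i + 50).toNat - i.toNat = 50 := by omega
  rw [this]
  push_cast
  ring

-- membership in enumerate gives the index bounds and the indexed element
theorem mem_enumerate_spec {α : Type} (d : α) (xs : List α) : ∀ (s : Int),
    ∀ pr ∈ PySem.List.enumerate xs s,
      s ≤ pr.1 ∧ pr.1 < s + xs.length ∧ PySem.List.pyGetD xs (pr.1 - s) d = pr.2 := by
  induction xs with
  | nil => intro s pr h; simp [PySem.List.enumerate_nil] at h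
  | cons x xs ih =>
    intro s pr h
    rw [PySem.List.enumerate_cons] at h
    rcases List.mem_cons.mp h with h | h
    · subst h; simp [PySem.List.pyGetD_zero_cons]
    · obtain ⟨h1, h2, h3⟩ := ih (s + 1) pr h
      refine ⟨by omega, by simp; omega, ?_⟩
      rw [PySem.List.pyGetD_of_nonneg _ _ (by omega)] at h3 ⊢
      have : (pr.1 - s).toNat = (pr.1 - (s + 1)).toNat + 1 := by omega
      rw [this]
      simpa using h3

-- ===== VERDICT (by name: the statement is the Claim_ definition above) =====
theorem apply_solid_principles_py_spec : Claim_equal_apply_solid_principles_py := by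
  intro code _
  unfold Spec_apply_solid_principles_py apply_solid_principles_py apply_solid_principles_py_alt
  by_cases hc : PySem.Str.isIn "class " code <;> simp only [hc, if_true, if_false, Bool.false_eq_true]
  set lines := PySem.Str.splitlines code with hlines
  set msg := "Consider splitting class - Single Responsibility Principle" with hmsg
  rw [pref_spec lines]
  -- B's range loop is a loop over the first components of enumerate
  have hrange : PySem.List.pyRange 0 (lines.length : Int) 1
      = (PySem.List.enumerate lines 0).map (fun pr => pr.1) := by
    simpa using (PySem.List.map_fst_enumerate lines 0).symm
  rw [hrange, List.foldl_map]
  -- A's class_lines is the filtered enumerate, projected to indices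
  rw [PySem.List.foldl_append_if (fun pr : Int × String => PySem.Str.isIn "class " pr.2)
    (fun pr : Int × String => pr.1)]
  rw [List.nil_append, List.foldl_map]
  -- rewrite B's body on enumerate members: pyGetD recovers the line, prefix diff = A's count
  have hcongr := PySem.List.foldl_congr_mem (PySem.List.enumerate lines 0)
    (fun acc pr =>
      if PySem.Str.isIn "class " (PySem.List.pyGetD lines pr.1 "") then
        if PySem.List.pyGetD ((List.range (lines.length + 1)).map
              (fun j => ((lines.take j).countP pvQ : Int))) (min (pr.1 + 50) (lines.length : Int)) 0
            - PySem.List.pyGetD ((List.range (lines.length + 1)).map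
              (fun j => ((lines.take j).countP pvQ : Int))) pr.1 0 > 7 then
          acc ++ [msg] else acc
      else acc)
    (fun acc pr =>
      if PySem.Str.isIn "class " pr.2 then
        if (PySem.List.slice lines (some pr.1) (some (pr.1 + 50))).foldl
            (fun c line => if PySem.Str.isIn "def " line then c + 1 else c) (0 : Int) > 7 then
          acc ++ [msg] else acc
      else acc)
    ([] : List String)
    (by
      intro acc pr hpr
      obtain ⟨h1, h2, h3⟩ := mem_enumerate_spec "" lines 0 pr hpr
      simp only [zero_add] at h2
      rw [sub_zero] at h3
      dsimp only
      rw [h3, cnt_eq lines pr.1 h1 h2])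
  rw [hcongr]
  rw [PySem.List.foldl_if_eq_foldl_filter (fun pr : Int × String => PySem.Str.isIn "class " pr.2)
    (fun (acc : List String) (pr : Int × String) =>
      if (PySem.List.slice lines (some pr.1) (some (pr.1 + 50))).foldl
          (fun c line => if PySem.Str.isIn "def " line = true then c + 1 else c) (0 : Int) > 7 then
        acc ++ [msg] else acc)]
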